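-- pv_equiv track=rewrite | github.com/SLIC-AI-LLC/T-ELF | TELF/applications/Lynx/frontend/pages/helpers/utils.py | get_token_index_map
-- ===== SOURCE A (Python) =====
-- def get_token_index_map(texts, tokens):
--     index_map = {}
--
--     for idx, text in enumerate(texts):
--         if not isinstance(text, str):
--             continue  # Skip non-string entries
--         for token in tokens:
--             if token in text:
--                 index_map.setdefault(token, []).append(idx)
--
--     return index_map
-- ===== SOURCE B (Python) =====
-- def get_token_index_map(texts, tokens):
--     # Two-phase build: discover key order from the stream of matches,
--     # then construct each token's index list with a comprehension.
--     indexed = [(i, t) for i, t in enumerate(texts) if isinstance(t, str)]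
--     order = dict.fromkeys(tok for _, t in indexed for tok in tokens if tok in t)
--     return {tok: [i for i, t in indexed if tok in t] for tok in order}
-- ===== Notes on version B (the rewrite author's own statement) =====
-- stated objective: alternative
-- what changed: A builds the dict incrementally with setdefault/append inside a texts-by-tokens loop; B is a two-phase build that first derives the key order as dict.fromkeys of the stream of matches and then constructs each token's index list with one comprehension per key; Pre_ excludes tokens lists in which a duplicated token matches some text, where A's repeated appends list an index once per duplicate occurrence while B lists it once — neither multiplicity is specified for a duplicated query token.
-- outside the precondition, e.g. on get_token_index_map(['ab'], ['a', 'a']): A returns {'a': [0, 0]}, B returns {'a': [0]}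
import Mathlib
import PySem

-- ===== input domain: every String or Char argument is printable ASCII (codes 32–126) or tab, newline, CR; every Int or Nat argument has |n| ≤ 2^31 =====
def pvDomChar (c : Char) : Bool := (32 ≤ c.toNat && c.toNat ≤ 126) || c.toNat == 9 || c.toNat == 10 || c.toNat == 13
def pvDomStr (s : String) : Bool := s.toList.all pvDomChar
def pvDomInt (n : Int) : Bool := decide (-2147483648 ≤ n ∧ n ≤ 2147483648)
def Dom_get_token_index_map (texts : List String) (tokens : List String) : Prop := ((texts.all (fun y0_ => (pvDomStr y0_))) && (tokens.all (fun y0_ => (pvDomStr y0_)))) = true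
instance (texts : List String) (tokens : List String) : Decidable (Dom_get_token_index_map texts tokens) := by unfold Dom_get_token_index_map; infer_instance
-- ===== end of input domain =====

-- B replaces A's incremental setdefault/append dict with a two-phase build (key order
-- by dedup of the match stream, then one comprehension per key); objective: alternative.

-- ===== PORT A =====
def get_token_index_map (texts : List String) (tokens : List String) : List (String × List Int) :=
  ((PySem.List.enumerate texts).foldl
    (fun d p =>
      -- 'if not isinstance(text, str): continue' never fires: every element of a List String is a str
      tokens.foldl
        (fun d token =>
          if PySem.Str.isIn token p.2 then d.modify token [] (fun v => v ++ [p.1]) else d)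
        d)
    PySem.Dict.empty).items

-- ===== PORT B =====
def get_token_index_map_alt (texts : List String) (tokens : List String) : List (String × List Int) :=
  -- 'indexed' keeps every entry: in a List String the isinstance filter is vacuous
  let indexed := PySem.List.enumerate texts
  let order := PySem.List.dedup
    (indexed.flatMap (fun p => tokens.filter (fun tok => PySem.Str.isIn tok p.2)))
  (order.foldl
    (fun d tok =>
      d.insert tok ((indexed.filter (fun p => PySem.Str.isIn tok p.2)).map (fun p => p.1)))
    PySem.Dict.empty).items

-- ===== PRECONDITION & SPEC =====
-- Pre_ excludes tokens lists in which a duplicated token matches some text: there A's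
-- repeated appends list a matching index once per duplicate occurrence while B lists it
-- once, and neither multiplicity is specified for a duplicated query token.
def Pre_get_token_index_map (texts : List String) (tokens : List String) : Prop :=
  ¬ ∃ tok ∈ tokens, 2 ≤ tokens.count tok ∧ ∃ text ∈ texts, PySem.Str.isIn tok text = true
instance (texts : List String) (tokens : List String) : Decidable (Pre_get_token_index_map texts tokens) := by unfold Pre_get_token_index_map; infer_instance

def pvWitness_get_token_index_map : List String × List String := (["ab"], ["a", "b"])

def Spec_get_token_index_map (texts : List String) (tokens : List String) (out : List (String × List Int)) : Prop := out = get_token_index_map_alt texts tokens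
instance (texts : List String) (tokens : List String) (out : List (String × List Int)) : Decidable (Spec_get_token_index_map texts tokens out) := by unfold Spec_get_token_index_map; infer_instance

-- ===== CLAIM (what is proved, stated in full; the proofs are below) =====
def Claim_equal_get_token_index_map : Prop := ∀ (texts : List String) (tokens : List String), Dom_get_token_index_map texts tokens → Pre_get_token_index_map texts tokens → Spec_get_token_index_map texts tokens (get_token_index_map texts tokens)

-- ===== LEMMAS AND PROOFS =====

-- keys of one modify step: setdefault-style key addition is Set.add
theorem pvKeysModifyAdd (d : PySem.Dict String (List Int)) (k : String) (f : List Int → List Int) :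
    (d.modify k [] f).keys = PySem.Set.add d.keys k := by
  rw [PySem.Dict.keys_modify]
  by_cases h : d.contains k
  · rw [PySem.Dict.keys_insert_of_contains _ _ h]
    simp [PySem.Set.add, PySem.Set.contains, (PySem.Dict.contains_iff_mem_keys d k).1 h]
  · rw [PySem.Dict.keys_insert_of_not_contains _ _ (by simpa using h)]
    have hk : k ∉ d.keys := fun hm => by
      simp [(PySem.Dict.contains_iff_mem_keys d k).2 hm] at h
    simp [PySem.Set.add, PySem.Set.contains, hk]

-- inner loop over tokens for one text: the value stored under c
theorem pvInnerGetD (text : String) (i : Int) (ts : List String) :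
    ∀ (d : PySem.Dict String (List Int)) (c : String),
    (ts.foldl
        (fun d token =>
          if PySem.Str.isIn token text then d.modify token [] (fun v => v ++ [i]) else d)
        d).getD c []
      = d.getD c [] ++ (if PySem.Str.isIn c text then List.replicate (ts.count c) i else []) := by
  induction ts with
  | nil => intro d c; simp
  | cons t ts ih =>
    intro d c
    by_cases ht : PySem.Str.isIn t text
    · rw [List.foldl_cons, if_pos ht, ih, PySem.Dict.getD_modify]
      by_cases hc : c = t
      · subst hc
        rw [if_pos rfl, if_pos ht, if_pos ht, List.count_cons_self,
          List.replicate_succ, List.append_assoc]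
        rfl
      · rw [if_neg hc, List.count_cons_of_ne (Ne.symm hc)]
    · rw [List.foldl_cons, if_neg ht, ih]
      by_cases hc : PySem.Str.isIn c text
      · have hne : c ≠ t := fun e => ht (e ▸ hc)
        rw [List.count_cons_of_ne (Ne.symm hne)]
      · rw [if_neg hc, if_neg hc]

-- inner loop over tokens for one text: the keys
theorem pvInnerKeys (text : String) (i : Int) (ts : List String) :
    ∀ (d : PySem.Dict String (List Int)),
    (ts.foldl
        (fun d token =>
          if PySem.Str.isIn token text then d.modify token [] (fun v => v ++ [i]) else d)
        d).keys
      = PySem.Set.update d.keys (ts.filter (fun t => PySem.Str.isIn t text)) := by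
  induction ts with
  | nil => intro d; simp [PySem.Set.update]
  | cons t ts ih =>
    intro d
    by_cases ht : PySem.Str.isIn t text
    · rw [List.foldl_cons, if_pos ht, ih, List.filter_cons_of_pos (by simpa using ht),
        pvKeysModifyAdd]
      rfl
    · rw [List.foldl_cons, if_neg ht, ih, List.filter_cons_of_neg (by simpa using ht)]

-- the outer loop over the enumerated texts, fully characterised
theorem pvOuter (tokens : List String) (L : List (Int × String)) :
    ∀ (d : PySem.Dict String (List Int)),
    (L.foldl
        (fun d p =>
          tokens.foldl
            (fun d token =>
              if PySem.Str.isIn token p.2 then d.modify token [] (fun v => v ++ [p.1]) else d)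
            d)
        d).keys
      = PySem.Set.update d.keys
          (L.flatMap (fun p => tokens.filter (fun tok => PySem.Str.isIn tok p.2)))
    ∧ ∀ c,
      (L.foldl
          (fun d p =>
            tokens.foldl
              (fun d token =>
                if PySem.Str.isIn token p.2 then d.modify token [] (fun v => v ++ [p.1]) else d)
              d)
          d).getD c []
        = d.getD c []
            ++ L.flatMap (fun p =>
                if PySem.Str.isIn c p.2 then List.replicate (tokens.count c) p.1 else []) := by
  induction L with
  | nil => intro d; exact ⟨by simp [PySem.Set.update], by intro c; simp⟩
  | cons q L ih =>
    intro d
    set d1 := tokens.foldl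
      (fun d token =>
        if PySem.Str.isIn token q.2 then d.modify token [] (fun v => v ++ [q.1]) else d) d with hd1
    obtain ⟨ihk, ihv⟩ := ih d1
    constructor
    · rw [List.foldl_cons, ← hd1, ihk, hd1, pvInnerKeys, List.flatMap_cons]
      simp [PySem.Set.update, List.foldl_append]
    · intro c
      rw [List.foldl_cons, ← hd1, ihv c, hd1, pvInnerGetD, List.flatMap_cons,
        List.append_assoc]

-- an association list with nodup keys is its key list decorated with the lookups
theorem pvItemsEq (l : List (String × List Int)) :
    (l.map Prod.fst).Nodup →
    l = (l.map Prod.fst).map (fun k => (k, (PySem.Dict.mk l).getD k [])) := by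
  induction l with
  | nil => intro _; rfl
  | cons a l ih =>
    intro h
    obtain ⟨k, v⟩ := a
    simp only [List.map_cons, List.nodup_cons] at h
    obtain ⟨hk, hl⟩ := h
    have head : (PySem.Dict.mk ((k, v) :: l)).getD k [] = v := by
      simp [PySem.Dict.getD_eq_get?_getD, PySem.Dict.get?_mk_cons]
    have tail : l = (l.map Prod.fst).map
        (fun k1 => (k1, (PySem.Dict.mk ((k, v) :: l)).getD k1 [])) :=
      (ih hl).trans (List.map_congr_left (fun k1 hk1 => by
        have hne : (k == k1) = false := by
          simp only [beq_eq_false_iff_ne]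
          exact fun e => hk (e ▸ hk1)
        simp [PySem.Dict.getD_eq_get?_getD, PySem.Dict.get?_mk_cons, hne]))
    show (k, v) :: l
        = (k, (PySem.Dict.mk ((k, v) :: l)).getD k [])
            :: (l.map Prod.fst).map (fun k1 => (k1, (PySem.Dict.mk ((k, v) :: l)).getD k1 []))
    rw [head, ← tail]

-- keys of A's dict equal B's 'order' list
theorem pvAkeys (texts tokens : List String) :
    (((PySem.List.enumerate texts).foldl
        (fun d p =>
          tokens.foldl
            (fun d token =>
              if PySem.Str.isIn token p.2 then d.modify token [] (fun v => v ++ [p.1]) else d)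
            d)
        PySem.Dict.empty).keys : List String)
      = PySem.Set.ofList
          ((PySem.List.enumerate texts).flatMap
            (fun p => tokens.filter (fun tok => PySem.Str.isIn tok p.2))) := by
  rw [(pvOuter tokens (PySem.List.enumerate texts) PySem.Dict.empty).1,
    PySem.Dict.keys_empty]
  exact PySem.Set.update_empty _

-- pvItemsEq, packaged on the Dict
theorem pvDictItemsEq (d : PySem.Dict String (List Int)) (h : d.keys.Nodup) :
    d.items = d.keys.map (fun k => (k, d.getD k [])) := by
  obtain ⟨l⟩ := d
  exact pvItemsEq l (by simpa [PySem.Dict.keys] using h)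

-- a flatMap of if-then-singleton is map-of-filter
theorem pvFlatMapFilter {α : Type} (P : α → Bool) (g : α → List Int) :
    ∀ (L : List α),
    L.flatMap (fun p => if P p then g p else []) = (L.filter P).flatMap g := by
  intro L
  induction L with
  | nil => rfl
  | cons q L ih =>
    by_cases h : P q
    · rw [List.flatMap_cons, if_pos h, List.filter_cons_of_pos h, List.flatMap_cons, ih]
    · rw [List.flatMap_cons, if_neg h, List.filter_cons_of_neg (by simpa using h), ih]
      simp

-- flatten of a map of singletons
theorem pvFlattenSingleton {α β : Type} (f : α → β) :
    ∀ (L : List α), (L.map (fun x => [f x])).flatten = L.map f := by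
  intro L
  induction L with
  | nil => rfl
  | cons q L ih => simp only [List.map_cons, List.flatten_cons, ih, List.singleton_append]

-- both ports as the same key list decorated with their respective value functions
theorem pvBothMaps (texts tokens : List String) :
    get_token_index_map texts tokens
      = (PySem.List.dedup
          ((PySem.List.enumerate texts).flatMap
            (fun p => tokens.filter (fun tok => PySem.Str.isIn tok p.2)))).map
          (fun k => (k, (PySem.List.enumerate texts).flatMap
            (fun p => if PySem.Str.isIn k p.2 then List.replicate (tokens.count k) p.1 else [])))
    ∧ get_token_index_map_alt texts tokens
      = (PySem.List.dedup
          ((PySem.List.enumerate texts).flatMap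
            (fun p => tokens.filter (fun tok => PySem.Str.isIn tok p.2)))).map
          (fun k => (k, ((PySem.List.enumerate texts).filter
            (fun p => PySem.Str.isIn k p.2)).map (fun p => p.1))) := by
  set order := PySem.List.dedup
    ((PySem.List.enumerate texts).flatMap
      (fun p => tokens.filter (fun tok => PySem.Str.isIn tok p.2))) with horder
  have hordernodup : order.Nodup := by
    rw [horder, PySem.List.dedup_eq_ofList]; exact PySem.Set.nodup_ofList _
  constructor
  · unfold get_token_index_map
    set D := (PySem.List.enumerate texts).foldl
      (fun d p =>
        tokens.foldl
          (fun d token =>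
            if PySem.Str.isIn token p.2 then d.modify token [] (fun v => v ++ [p.1]) else d)
          d)
      PySem.Dict.empty with hD
    have hkeys : D.keys = order := by
      rw [hD, pvAkeys, horder, PySem.List.dedup_eq_ofList]
    rw [pvDictItemsEq D (by rw [hkeys]; exact hordernodup), hkeys]
    refine List.map_congr_left (fun k _ => ?_)
    rw [hD, (pvOuter tokens (PySem.List.enumerate texts) PySem.Dict.empty).2 k]
    simp [PySem.Dict.getD_empty]
  · unfold get_token_index_map_alt
    dsimp only
    rw [← horder]
    have := PySem.Dict.items_foldl_insert_fresh order (fun tok => tok)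
      (fun k => ((PySem.List.enumerate texts).filter
        (fun p => PySem.Str.isIn k p.2)).map (fun p => p.1)) PySem.Dict.empty
      (fun a _ => by simp [PySem.Dict.contains_empty]) (by simpa using hordernodup)
    simpa using this

-- membership in B's key list unpacked
theorem pvMemOrder (texts tokens : List String) (k : String) :
    k ∈ PySem.List.dedup
        ((PySem.List.enumerate texts).flatMap
          (fun p => tokens.filter (fun tok => PySem.Str.isIn tok p.2)))
      ↔ k ∈ tokens ∧ ∃ text ∈ texts, PySem.Str.isIn k text = true := by
  rw [PySem.List.mem_dedup, List.mem_flatMap]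
  constructor
  · rintro ⟨p, hp, hk⟩
    rw [List.mem_filter] at hk
    refine ⟨hk.1, p.2, ?_, hk.2⟩
    have := PySem.List.map_snd_enumerate texts 0
    exact this ▸ List.mem_map_of_mem hp
  · rintro ⟨hk, text, ht, hin⟩
    have : text ∈ (PySem.List.enumerate texts).map (·.2) := by
      rw [PySem.List.map_snd_enumerate]; exact ht
    obtain ⟨p, hp, hpe⟩ := List.mem_map.1 this
    exact ⟨p, hp, List.mem_filter.2 ⟨hk, hpe ▸ hin⟩⟩

-- ===== VERDICT (by name: the statement is the Claim_ definition above) =====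
theorem get_token_index_map_spec : Claim_equal_get_token_index_map := by
  intro texts tokens _ hnD
  obtain ⟨hA, hB⟩ := pvBothMaps texts tokens
  unfold Spec_get_token_index_map
  rw [hA, hB]
  refine List.map_congr_left (fun k hk => ?_)
  obtain ⟨hktok, text, ht, hin⟩ := (pvMemOrder texts tokens k).1 hk
  have hcount : tokens.count k = 1 := by
    have h1 : 1 ≤ tokens.count k := List.one_le_count_iff.2 hktok
    have h2 : ¬ 2 ≤ tokens.count k := fun h2 =>
      hnD ⟨k, hktok, h2, text, ht, hin⟩
    omega
  rw [hcount]
  congr 1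
  rw [pvFlatMapFilter (fun p => PySem.Str.isIn k p.2) (fun p => List.replicate 1 p.1)
    (PySem.List.enumerate texts)]
  simp only [List.flatMap, List.replicate_one]
  exact pvFlattenSingleton (fun p : Int × String => p.1) _
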